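-- pv_equiv track=rewrite | github.com/Ekaj18/CSCI451 | HW5.py | create_dist_matrix
-- ===== SOURCE A (Python) =====
-- def score(i, j):
--     if i is j:
--         return 0
--     else:
--         return -1
--
-- def pairwise_edit_distance(s, t):
--     v = [[0 for i in range(len(t)+1)] for j in range(len(s)+1)]
--     for i in range(1,len(s)+1):
--         for j in range(1,len(t)+1):
--             v[i][j] = max( v[i-1][j-1] + score(s[i-1],t[j-1]),
--                            v[i-1][j] + score(s[i-1]," "),
--                            v[i][j-1] + score(" ",t[j-1]))
--     return v[len(s)][len(t)]
--
-- def create_dist_matrix(slist):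
--     d = [[0 for i in range(len(slist))] for j in range(len(slist))]
--     for i in range(len(slist)):
--         for j in range(i,len(slist)):
--             if i != j:
--                 d[i][j] = pairwise_edit_distance(slist[i],slist[j])
--                 d[j][i] = d[i][j]
--     return d
-- ===== SOURCE B (Python) =====
-- def _score(a, b):
--     return 0 if a == b else -1
--
-- def _align(s, t):
--     # top-down memoized recursion over (i, j) instead of a bottom-up table
--     memo = {}
--     def go(i, j):
--         if i == 0 or j == 0:
--             return 0
--         if (i, j) not in memo:
--             memo[(i, j)] = max(go(i - 1, j - 1) + _score(s[i - 1], t[j - 1]),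
--                                go(i - 1, j) + _score(s[i - 1], " "),
--                                go(i, j - 1) + _score(" ", t[j - 1]))
--         return memo[(i, j)]
--     return go(len(s), len(t))
--
-- def create_dist_matrix(slist):
--     n = len(slist)
--     # each unordered pair is aligned exactly once, stored in a triangular table
--     tri = [[_align(slist[i], slist[j]) for j in range(i + 1, n)] for i in range(n)]
--     return [[0 if i == j else tri[min(i, j)][max(i, j) - min(i, j) - 1]
--              for j in range(n)] for i in range(n)]
-- ===== Notes on version B (the rewrite author's own statement) =====
-- stated objective: alternative
-- what changed: pairwise alignment is computed by top-down memoized recursion over (i,j) with a dict instead of a bottom-up mutable table, each unordered pair is aligned exactly once and stored in a triangular list (A recomputes nothing but fills both cells from one in-place double loop), and the result matrix is assembled by a comprehension indexing that triangle; the identity-based score test is replaced by plain equality, which coincides on the ASCII domain.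
import Mathlib
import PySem

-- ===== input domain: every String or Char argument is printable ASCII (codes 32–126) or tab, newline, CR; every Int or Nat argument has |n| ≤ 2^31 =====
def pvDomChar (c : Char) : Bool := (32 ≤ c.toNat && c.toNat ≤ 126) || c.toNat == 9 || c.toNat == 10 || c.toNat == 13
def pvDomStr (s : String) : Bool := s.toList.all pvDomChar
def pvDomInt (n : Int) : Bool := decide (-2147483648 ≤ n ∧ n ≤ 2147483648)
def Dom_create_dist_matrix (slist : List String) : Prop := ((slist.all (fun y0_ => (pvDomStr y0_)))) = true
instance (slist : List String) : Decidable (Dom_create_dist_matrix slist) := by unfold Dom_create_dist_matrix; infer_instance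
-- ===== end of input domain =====

-- B computes each pairwise alignment by top-down memoized recursion (a dict keyed by (i,j))
-- instead of A's bottom-up mutable table, aligns each unordered pair exactly once into a
-- triangular list, and assembles the symmetric matrix by a comprehension over that triangle;
-- same values on the ASCII domain (where Python's `is` on one-character strings coincides
-- with `==`), no speed claim.

-- ===== PORT A =====
-- score(i, j): on the ASCII domain one-character strings are interned, so `i is j` = `i == j`;
-- modelled on Char (string indexing yields one character).
def pyscore (i j : Char) : Int := if i = j then 0 else -1

-- inner-loop body of pairwise_edit_distance: v[i][j] = max(...).  All indices are in range in the
-- loops, so List.getD / List.set are exact for Python's v[i][j] read/write.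
def pedStepA (sl tl : List Char) (i : Nat) (v : List (List Int)) (j : Nat) : List (List Int) :=
  v.set i ((v.getD i []).set j
    (max (max ((v.getD (i-1) []).getD (j-1) 0 + pyscore (sl.getD (i-1) ' ') (tl.getD (j-1) ' '))
              ((v.getD (i-1) []).getD j 0 + pyscore (sl.getD (i-1) ' ') ' '))
         ((v.getD i []).getD (j-1) 0 + pyscore ' ' (tl.getD (j-1) ' '))))

-- pairwise_edit_distance(s, t): full (len s+1)×(len t+1) table, filled row-major.
-- range(1, len+1) = List.range' 1 len.
def pairwise_edit_distance (s t : String) : Int :=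
  let sl := s.toList
  let tl := t.toList
  let v0 : List (List Int) := List.replicate (sl.length + 1) (List.replicate (tl.length + 1) 0)
  let v := (List.range' 1 sl.length).foldl
    (fun v i => (List.range' 1 tl.length).foldl (pedStepA sl tl i) v) v0
  (v.getD sl.length []).getD tl.length 0

-- inner-loop body of create_dist_matrix: d[i][j] = pairwise_edit_distance(...); d[j][i] = d[i][j]
def matStepA (slist : List String) (i : Nat) (d : List (List Int)) (j : Nat) : List (List Int) :=
  if i ≠ j then
    let d1 := d.set i ((d.getD i []).set j
      (pairwise_edit_distance (slist.getD i "") (slist.getD j "")))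
    d1.set j ((d1.getD j []).set i ((d1.getD i []).getD j 0))
  else d

def create_dist_matrix (slist : List String) : List (List Int) :=
  let n := slist.length
  let d0 : List (List Int) := List.replicate n (List.replicate n 0)
  (List.range n).foldl (fun d i => (List.range' i (n - i)).foldl (matStepA slist i) d) d0

-- ===== PORT B =====
-- Source B's _score (plain equality; coincides with A's `is` on the ASCII domain)
def scoreB (a b : Char) : Int := if a = b then 0 else -1

-- Source B's go: top-down recursion memoized in a dict keyed by (i, j); the memo dict is threaded
-- through explicitly (Python mutates the closure's dict in place).
def goB (sl tl : List Char) : Nat → Nat → PySem.Dict (Nat × Nat) Int →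
    Int × PySem.Dict (Nat × Nat) Int
  | 0, _, m => (0, m)
  | _+1, 0, m => (0, m)
  | i+1, j+1, m =>
    match m.get? (i+1, j+1) with
    | some v => (v, m)
    | none =>
      let p1 := goB sl tl i j m
      let p2 := goB sl tl i (j+1) p1.2
      let p3 := goB sl tl (i+1) j p2.2
      let v := max (max (p1.1 + scoreB (sl.getD i ' ') (tl.getD j ' '))
                        (p2.1 + scoreB (sl.getD i ' ') ' '))
                   (p3.1 + scoreB ' ' (tl.getD j ' '))
      (v, p3.2.insert (i+1, j+1) v)
  termination_by i j _ => (i, j)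

-- Source B's _align(s, t): fresh memo, evaluate at (len s, len t)
def align_alt (s t : String) : Int :=
  (goB s.toList t.toList s.toList.length t.toList.length PySem.Dict.empty).1

-- Source B's create_dist_matrix: triangular table, then a comprehension over it.
-- range(i+1, n) = List.range' (i+1) (n-(i+1)); tri[...] reads are always in range, so getD is exact.
def create_dist_matrix_alt (slist : List String) : List (List Int) :=
  let n := slist.length
  let tri := (List.range n).map (fun i =>
    (List.range' (i+1) (n-(i+1))).map (fun j => align_alt (slist.getD i "") (slist.getD j "")))
  (List.range n).map (fun i => (List.range n).map (fun j =>
    if i = j then 0 else (tri.getD (min i j) []).getD (max i j - min i j - 1) 0))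

-- ===== PRECONDITION & SPEC =====
def Spec_create_dist_matrix (slist : List String) (out : List (List Int)) : Prop := out = create_dist_matrix_alt slist
instance (slist : List String) (out : List (List Int)) : Decidable (Spec_create_dist_matrix slist out) := by unfold Spec_create_dist_matrix; infer_instance

-- ===== CLAIM (what is proved, stated in full; the proofs are below) =====
def Claim_equal_create_dist_matrix : Prop := ∀ (slist : List String), Dom_create_dist_matrix slist → Spec_create_dist_matrix slist (create_dist_matrix slist)

-- ===== LEMMAS AND PROOFS =====

-- The common alignment recurrence both ports compute.
def E (sl tl : List Char) : Nat → Nat → Int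
  | 0, _ => 0
  | _+1, 0 => 0
  | i+1, j+1 =>
      max (max (E sl tl i j + pyscore (sl.getD i ' ') (tl.getD j ' '))
               (E sl tl i (j+1) + pyscore (sl.getD i ' ') ' '))
          (E sl tl (i+1) j + pyscore ' ' (tl.getD j ' '))
  termination_by i j => (i, j)

lemma E_zero_left (sl tl : List Char) (j : Nat) : E sl tl 0 j = 0 := by
  cases j <;> simp [E]

lemma E_zero_right (sl tl : List Char) (i : Nat) : E sl tl i 0 = 0 := by
  cases i <;> simp [E]

lemma E_succ (sl tl : List Char) (i j : Nat) :
    E sl tl (i+1) (j+1) =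
      max (max (E sl tl i j + pyscore (sl.getD i ' ') (tl.getD j ' '))
               (E sl tl i (j+1) + pyscore (sl.getD i ' ') ' '))
          (E sl tl (i+1) j + pyscore ' ' (tl.getD j ' ')) := by
  simp [E]

-- List helpers over (List.range k).map f
lemma getD_map_range {α : Type} (f : Nat → α) (k p : Nat) (d : α) (h : p < k) :
    ((List.range k).map f).getD p d = f p := by
  simp [List.getD, h]

lemma getD_map_range' {α : Type} (f : Nat → α) (s len p : Nat) (d : α) (h : p < len) :
    ((List.range' s len).map f).getD p d = f (s + p) := by
  simp [List.getD, h]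

lemma set_map_range {α : Type} (f : Nat → α) (k p : Nat) (x : α) :
    ((List.range k).map f).set p x = (List.range k).map (fun q => if q = p then x else f q) := by
  apply List.ext_getElem
  · simp
  · intro q h1 h2
    simp only [List.getElem_set, List.getElem_map, List.getElem_range]
    by_cases h : p = q
    · subst h; simp
    · rw [if_neg h, if_neg (by omega)]

lemma replicate_eq_map_range {α : Type} (k : Nat) (x : α) :
    List.replicate k x = (List.range k).map (fun _ => x) := by
  simp [List.map_const']

lemma getD_set_self {α : Type} (l : List α) (p : Nat) (x d : α) (h : p < l.length) :
    (l.set p x).getD p d = x := by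
  simp [List.getD, h]

lemma getD_set_ne {α : Type} (l : List α) (p q : Nat) (x d : α) (h : p ≠ q) :
    (l.set p x).getD q d = l.getD q d := by
  simp [List.getD, List.getElem?_set_ne h]

-- ---------- the pairwise table of A ----------

-- partial table state: rows < i full, row i filled through column j, rows > i untouched zeros
def mid (sl tl : List Char) (i j : Nat) : List (List Int) :=
  (List.range (sl.length+1)).map (fun p =>
    if p < i then (List.range (tl.length+1)).map (E sl tl p)
    else if p = i then (List.range (tl.length+1)).map (fun q => if q ≤ j then E sl tl p q else 0)
    else List.replicate (tl.length+1) 0)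

lemma mid_row_self (sl tl : List Char) (i j : Nat) (hp : i ≤ sl.length) :
    (mid sl tl i j).getD i [] =
      (List.range (tl.length+1)).map (fun q => if q ≤ j then E sl tl i q else 0) := by
  unfold mid
  rw [getD_map_range _ _ _ _ (by omega)]
  simp

lemma mid_read_lt (sl tl : List Char) (i j p q : Nat) (h : p < i) (hp : p ≤ sl.length)
    (hq : q ≤ tl.length) : ((mid sl tl i j).getD p []).getD q 0 = E sl tl p q := by
  unfold mid
  rw [getD_map_range _ _ _ _ (by omega), if_pos h, getD_map_range _ _ _ _ (by omega)]

lemma mid_read_self (sl tl : List Char) (i j q : Nat) (hp : i ≤ sl.length) (hq : q ≤ tl.length) :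
    ((mid sl tl i j).getD i []).getD q 0 = if q ≤ j then E sl tl i q else 0 := by
  rw [mid_row_self _ _ _ _ hp, getD_map_range _ _ _ _ (by omega)]

lemma mid_init (sl tl : List Char) :
    List.replicate (sl.length+1) (List.replicate (tl.length+1) (0:Int)) = mid sl tl 0 0 := by
  unfold mid
  rw [replicate_eq_map_range]
  refine List.map_congr_left ?_
  intro p _
  by_cases h1 : p < 0
  · omega
  · rw [if_neg h1]
    by_cases h2 : p = 0
    · subst h2
      rw [if_pos rfl, replicate_eq_map_range]
      refine List.map_congr_left ?_
      intro q _
      by_cases h : q ≤ 0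
      · interval_cases q
        simp [E_zero_left]
      · rw [if_neg h]
    · rw [if_neg h2]

lemma mid_zero (sl tl : List Char) (j : Nat) : mid sl tl 0 0 = mid sl tl 0 j := by
  unfold mid
  refine List.map_congr_left ?_
  intro p _
  by_cases h1 : p < 0
  · omega
  · rw [if_neg h1, if_neg h1]
    by_cases h2 : p = 0
    · subst h2
      rw [if_pos rfl, if_pos rfl]
      refine List.map_congr_left ?_
      intro q _
      split_ifs <;> simp [E_zero_left]
    · rw [if_neg h2, if_neg h2]

lemma mid_row_shift (sl tl : List Char) (i : Nat) :
    mid sl tl i tl.length = mid sl tl (i+1) 0 := by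
  unfold mid
  refine List.map_congr_left ?_
  intro p hp
  simp only [List.mem_range] at hp
  by_cases h1 : p < i
  · rw [if_pos h1, if_pos (by omega)]
  · rw [if_neg h1]
    by_cases h2 : p = i
    · subst h2
      rw [if_pos rfl, if_pos (by omega)]
      refine List.map_congr_left ?_
      intro q hq
      simp only [List.mem_range] at hq
      rw [if_pos (by omega)]
    · rw [if_neg h2, if_neg (by omega)]
      by_cases h3 : p = i + 1
      · subst h3
        rw [if_pos rfl, replicate_eq_map_range]
        refine List.map_congr_left ?_
        intro q _
        by_cases h4 : q ≤ 0
        · interval_cases q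
          rw [if_pos (le_refl 0), E_zero_right]
        · rw [if_neg h4]
      · rw [if_neg h3]

lemma pedStepA_mid (sl tl : List Char) (i j : Nat) (hi : i < sl.length) (hj : j < tl.length) :
    pedStepA sl tl (i+1) (mid sl tl (i+1) j) (j+1) = mid sl tl (i+1) (j+1) := by
  unfold pedStepA
  simp only [Nat.add_sub_cancel]
  rw [mid_read_lt _ _ _ _ _ _ (by omega) (by omega) (by omega),
      mid_read_lt _ _ _ _ _ _ (by omega) (by omega) (by omega),
      mid_read_self _ _ _ _ _ (by omega) (by omega),
      if_pos (le_refl j),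
      mid_row_self _ _ _ _ (by omega),
      set_map_range]
  unfold mid
  rw [set_map_range]
  refine List.map_congr_left ?_
  intro p hp
  simp only [List.mem_range] at hp
  by_cases hpi : p = i + 1
  · subst hpi
    rw [if_pos rfl, if_neg (by omega), if_pos rfl]
    refine List.map_congr_left ?_
    intro q hq
    simp only [List.mem_range] at hq
    by_cases hqj : q = j + 1
    · subst hqj
      rw [if_pos rfl, if_pos (le_refl _), E_succ]
    · rw [if_neg hqj]
      by_cases h2 : q ≤ j
      · rw [if_pos h2, if_pos (by omega)]
      · rw [if_neg h2, if_neg (by omega)]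
  · rw [if_neg hpi]
    by_cases hlt : p < i + 1
    · rw [if_pos hlt, if_pos hlt]
    · rw [if_neg hlt, if_neg hlt, if_neg hpi, if_neg hpi]

lemma innerA_fold (sl tl : List Char) (i : Nat) (hi : i < sl.length) :
    ∀ k, k ≤ tl.length →
      (List.range' 1 k).foldl (pedStepA sl tl (i+1)) (mid sl tl (i+1) 0) = mid sl tl (i+1) k := by
  intro k
  induction k with
  | zero => intro _; simp
  | succ k ih =>
    intro hk
    rw [List.range'_concat, List.foldl_append, ih (by omega)]
    simp only [List.foldl_cons, List.foldl_nil, Nat.one_mul]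
    have h1 : 1 + k = k + 1 := by omega
    rw [h1, pedStepA_mid sl tl i k hi (by omega)]

lemma outerA_fold (sl tl : List Char) :
    ∀ k, k ≤ sl.length →
      (List.range' 1 k).foldl
        (fun v i => (List.range' 1 tl.length).foldl (pedStepA sl tl i) v)
        (mid sl tl 0 0) = mid sl tl k tl.length := by
  intro k
  induction k with
  | zero => intro _; exact mid_zero sl tl tl.length
  | succ k ih =>
    intro hk
    rw [List.range'_concat, List.foldl_append, ih (by omega)]
    simp only [List.foldl_cons, List.foldl_nil, Nat.one_mul]
    have h1 : 1 + k = k + 1 := by omega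
    rw [h1, mid_row_shift, innerA_fold sl tl k (by omega) tl.length (le_refl _)]

lemma ped_A_eq_E (s t : String) :
    pairwise_edit_distance s t = E s.toList t.toList s.toList.length t.toList.length := by
  unfold pairwise_edit_distance
  simp only []
  rw [mid_init, outerA_fold s.toList t.toList s.toList.length (le_refl _),
      mid_read_self _ _ _ _ _ (le_refl _) (le_refl _), if_pos (le_refl _)]

-- ---------- the memoized recursion of B ----------

-- every value stored in the memo is the recurrence's value at its key
def InvB (sl tl : List Char) (m : PySem.Dict (Nat × Nat) Int) : Prop :=
  ∀ k v, m.get? k = some v → v = E sl tl k.1 k.2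

lemma InvB_empty (sl tl : List Char) : InvB sl tl PySem.Dict.empty := by
  intro k v h
  rw [PySem.Dict.get?_empty] at h
  exact absurd h (by simp)

lemma goB_correct (sl tl : List Char) :
    ∀ i j m, InvB sl tl m →
      (goB sl tl i j m).1 = E sl tl i j ∧ InvB sl tl (goB sl tl i j m).2 := by
  intro i
  induction i with
  | zero =>
    intro j m hm
    exact ⟨by simp [goB, E_zero_left], by simpa [goB] using hm⟩
  | succ i ihi =>
    intro j
    induction j with
    | zero =>
      intro m hm
      exact ⟨by simp [goB, E_zero_right], by simpa [goB] using hm⟩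
    | succ j ihj =>
      intro m hm
      rw [goB]
      cases hg : m.get? (i+1, j+1) with
      | some v =>
        simp only []
        exact ⟨hm _ _ hg, hm⟩
      | none =>
        simp only []
        obtain ⟨h1, hm1⟩ := ihi j m hm
        obtain ⟨h2, hm2⟩ := ihi (j+1) (goB sl tl i j m).2 hm1
        obtain ⟨h3, hm3⟩ := ihj (goB sl tl i (j+1) (goB sl tl i j m).2).2 hm2
        refine ⟨?_, ?_⟩
        · rw [h1, h2, h3, E_succ]
          rfl
        · intro k v hk
          rw [PySem.Dict.get?_insert] at hk
          by_cases hkk : k = (i+1, j+1)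
          · rw [if_pos hkk] at hk
            cases hk
            rw [hkk, h1, h2, h3, E_succ]
            rfl
          · rw [if_neg hkk] at hk
            exact hm3 _ _ hk

lemma align_alt_eq_E (s t : String) :
    align_alt s t = E s.toList t.toList s.toList.length t.toList.length := by
  unfold align_alt
  exact (goB_correct s.toList t.toList _ _ _ (InvB_empty _ _)).1

lemma ped_A_eq_alt (s t : String) : pairwise_edit_distance s t = align_alt s t := by
  rw [ped_A_eq_E, align_alt_eq_E]

-- ---------- the matrix ----------

def Pd (slist : List String) (a b : Nat) : Int :=
  pairwise_edit_distance (slist.getD a "") (slist.getD b "")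

-- matrix entry after outer rows < i are done and, in row i, columns up to j are done
def ent (slist : List String) (i j r c : Nat) : Int :=
  if r = c then 0
  else if min r c < i ∨ (min r c = i ∧ max r c ≤ j) then Pd slist (min r c) (max r c) else 0

def Mmid (slist : List String) (i j : Nat) : List (List Int) :=
  (List.range slist.length).map (fun r => (List.range slist.length).map (ent slist i j r))

lemma Mmid_length (slist : List String) (i j : Nat) : (Mmid slist i j).length = slist.length := by
  simp [Mmid]

lemma Mmid_row (slist : List String) (i j r : Nat) (hr : r < slist.length) :
    (Mmid slist i j).getD r [] = (List.range slist.length).map (ent slist i j r) := by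
  unfold Mmid
  rw [getD_map_range _ _ _ _ hr]

lemma Mmid_init (slist : List String) :
    List.replicate slist.length (List.replicate slist.length (0:Int)) = Mmid slist 0 0 := by
  unfold Mmid
  rw [replicate_eq_map_range]
  refine List.map_congr_left ?_
  intro r _
  rw [replicate_eq_map_range]
  refine List.map_congr_left ?_
  intro c _
  unfold ent
  split_ifs <;> first | rfl | omega

lemma Mmid_pred (slist : List String) (i : Nat) : Mmid slist i (i-1) = Mmid slist i i := by
  unfold Mmid
  refine List.map_congr_left ?_
  intro r _
  refine List.map_congr_left ?_
  intro c _
  unfold ent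
  split_ifs <;> first | rfl | omega

lemma Mmid_shift (slist : List String) (k : Nat) (hk : k < slist.length) :
    Mmid slist k (slist.length - 1) = Mmid slist (k+1) (k+1) := by
  unfold Mmid
  refine List.map_congr_left ?_
  intro r hr
  simp only [List.mem_range] at hr
  refine List.map_congr_left ?_
  intro c hc
  simp only [List.mem_range] at hc
  unfold ent
  split_ifs <;> first | rfl | omega

lemma matStepA_mid (slist : List String) (i c : Nat) (hic : i < c) (hc : c < slist.length) :
    matStepA slist i (Mmid slist i (c-1)) c = Mmid slist i c := by
  unfold matStepA
  rw [if_pos (show i ≠ c by omega)]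
  simp only []
  rw [Mmid_row _ _ _ _ (by omega)]
  have hv : ((Mmid slist i (c-1)).set i
      (((List.range slist.length).map (ent slist i (c-1) i)).set c
        (pairwise_edit_distance (slist.getD i "") (slist.getD c "")))).getD i []
      = ((List.range slist.length).map (ent slist i (c-1) i)).set c
        (pairwise_edit_distance (slist.getD i "") (slist.getD c "")) := by
    rw [getD_set_self _ _ _ _ (by rw [Mmid_length]; omega)]
  rw [hv]
  rw [getD_set_self _ _ _ _ (by simp; omega)]
  rw [getD_set_ne _ _ _ _ _ (show i ≠ c by omega)]
  rw [Mmid_row _ _ _ _ (by omega)]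
  have hPd : pairwise_edit_distance (slist.getD i "") (slist.getD c "") = Pd slist i c := rfl
  rw [hPd]
  rw [set_map_range (ent slist i (c-1) i) slist.length c (Pd slist i c)]
  rw [set_map_range (ent slist i (c-1) c) slist.length i (Pd slist i c)]
  unfold Mmid
  rw [set_map_range, set_map_range]
  refine List.map_congr_left ?_
  intro r hr
  simp only [List.mem_range] at hr
  by_cases hrc : r = c
  · rw [if_pos hrc, hrc]
    refine List.map_congr_left ?_
    intro q hq
    simp only [List.mem_range] at hq
    by_cases hqi : q = i
    · rw [if_pos hqi]
      unfold ent
      rw [if_neg (by omega), if_pos (by omega)]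
      have h1 : min c q = i := by omega
      have h2 : max c q = c := by omega
      rw [h1, h2]
    · rw [if_neg hqi]
      unfold ent
      split_ifs <;> first | rfl | omega
  · rw [if_neg hrc]
    by_cases hri : r = i
    · rw [if_pos hri, hri]
      refine List.map_congr_left ?_
      intro q hq
      simp only [List.mem_range] at hq
      by_cases hqc : q = c
      · rw [if_pos hqc]
        unfold ent
        rw [if_neg (by omega), if_pos (by omega)]
        have h1 : min i q = i := by omega
        have h2 : max i q = c := by omega
        rw [h1, h2]
      · rw [if_neg hqc]
        unfold ent
        split_ifs <;> first | rfl | omega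
    · rw [if_neg hri]
      refine List.map_congr_left ?_
      intro q hq
      simp only [List.mem_range] at hq
      unfold ent
      split_ifs <;> first | rfl | omega

lemma innerM_fold (slist : List String) (i : Nat) :
    ∀ k, i + k ≤ slist.length →
      (List.range' i k).foldl (matStepA slist i) (Mmid slist i i) = Mmid slist i (i + k - 1) := by
  intro k
  induction k with
  | zero =>
    intro _
    simp only [List.range'_zero, List.foldl_nil, Nat.add_zero]
    exact (Mmid_pred slist i).symm
  | succ k ih =>
    intro hk
    rw [List.range'_concat, List.foldl_append, ih (by omega)]
    simp only [List.foldl_cons, List.foldl_nil, Nat.one_mul]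
    cases k with
    | zero =>
      simp only [Nat.add_zero]
      unfold matStepA
      rw [if_neg (by omega), Nat.add_sub_cancel]
      exact Mmid_pred slist i
    | succ k =>
      have h2 : matStepA slist i (Mmid slist i (i + (k + 1) - 1)) (i + (k+1))
          = Mmid slist i (i + (k+1)) := by
        have := matStepA_mid slist i (i + (k+1)) (by omega) (by omega)
        simpa using this
      have h3 : i + (k + 1 + 1) - 1 = i + (k + 1) := by omega
      rw [h3, h2]

lemma outerM_fold (slist : List String) :
    ∀ k, k ≤ slist.length →
      (List.range k).foldl
        (fun d i => (List.range' i (slist.length - i)).foldl (matStepA slist i) d)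
        (Mmid slist 0 0) = Mmid slist k k := by
  intro k
  induction k with
  | zero => intro _; rfl
  | succ k ih =>
    intro hk
    rw [List.range_succ, List.foldl_append, ih (by omega)]
    simp only [List.foldl_cons, List.foldl_nil]
    rw [innerM_fold slist k (slist.length - k) (by omega)]
    have h1 : k + (slist.length - k) - 1 = slist.length - 1 := by omega
    rw [h1]
    exact Mmid_shift slist k (by omega)

-- B's triangular read, for r ≠ c in range, is the alignment of the (min, max) pair
lemma tri_read (slist : List String) (r c : Nat) (hr : r < slist.length)
    (hc : c < slist.length) (hrc : r ≠ c) :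
    (((List.range slist.length).map (fun i =>
        (List.range' (i+1) (slist.length-(i+1))).map
          (fun j => align_alt (slist.getD i "") (slist.getD j "")))).getD (min r c) []).getD
        (max r c - min r c - 1) 0
      = align_alt (slist.getD (min r c) "") (slist.getD (max r c) "") := by
  rw [getD_map_range _ _ _ _ (by omega)]
  rw [getD_map_range' _ _ _ _ _ (by omega)]
  congr 2
  omega

theorem create_dist_matrix_spec : Claim_equal_create_dist_matrix := by
  intro slist _
  unfold Spec_create_dist_matrix create_dist_matrix create_dist_matrix_alt
  simp only []
  rw [Mmid_init, outerM_fold slist slist.length (le_refl _)]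
  unfold Mmid
  refine List.map_congr_left ?_
  intro r hr
  simp only [List.mem_range] at hr
  refine List.map_congr_left ?_
  intro c hc
  simp only [List.mem_range] at hc
  unfold ent
  by_cases h : r = c
  · rw [if_pos h, if_pos h]
  · rw [if_neg h, if_neg h, if_pos (by omega), tri_read slist r c hr hc h]
    unfold Pd
    rw [ped_A_eq_alt]
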